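-- pv_equiv track=rewrite | github.com/benabdel1u/biblical-scripts | sefaria_merge_v14.py | expand_aliases_for_root
-- ===== SOURCE A (Python) =====
-- ROOT_ALIASES = {
--     'HRH': {'BVN'},
--     'NTN': {'CLM'},
--     'NC>': {'NC>', 'NCJ'},
--     'RDH': {'CLV'},
--     'MCL': {'CLV'},
--     'CLV': {'CLV', 'MCL', 'RDH'},
--     'BW>': {'>TJ'},
-- }
--
-- def expand_aliases_for_root(root):
--     """Fetch known alias set from ROOT_ALIASES."""
--     aliases = set()
--     if root in ROOT_ALIASES:
--         aliases |= set(ROOT_ALIASES[root])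
--     for k, v in ROOT_ALIASES.items():
--         if root in v:
--             aliases.add(k)
--             aliases |= set(v)
--     aliases.add(root)
--     return aliases
-- ===== SOURCE B (Python) =====
-- ROOT_ALIASES = {
--     'HRH': {'BVN'},
--     'NTN': {'CLM'},
--     'NC>': {'NC>', 'NCJ'},
--     'RDH': {'CLV'},
--     'MCL': {'CLV'},
--     'CLV': {'CLV', 'MCL', 'RDH'},
--     'BW>': {'>TJ'},
-- }
--
-- # One-time index: _REVERSE[m] = union of {k} | v over all items (k, v) with m in v,
-- # then EXPANSION[s] = full one-step alias answer for every symbol s that occurs anywhere.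
-- _REVERSE = {}
-- for _k, _v in ROOT_ALIASES.items():
--     for _m in _v:
--         _e = _REVERSE.setdefault(_m, set())
--         _e.add(_k)
--         _e.update(_v)
--
-- EXPANSION = {}
-- for _s in list(ROOT_ALIASES) + [m for v in ROOT_ALIASES.values() for m in v]:
--     _full = set(ROOT_ALIASES.get(_s, ()))
--     _full |= _REVERSE.get(_s, set())
--     _full.add(_s)
--     EXPANSION[_s] = _full
--
-- def expand_aliases_for_root(root):
--     """Fetch known alias set from ROOT_ALIASES (precomputed table lookup)."""
--     full = EXPANSION.get(root)
--     return set(full) if full is not None else {root}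
-- ===== Notes on version B (the rewrite author's own statement) =====
-- stated objective: alternative
-- what changed: Per-call forward-lookup plus full scan of ROOT_ALIASES is replaced by a module-load precomputed reverse index and a full-answer table EXPANSION mapping every occurring symbol to its complete alias set, so each call is a single O(1) dictionary lookup (fresh copy) with {root} as the fallback.
import Mathlib
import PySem

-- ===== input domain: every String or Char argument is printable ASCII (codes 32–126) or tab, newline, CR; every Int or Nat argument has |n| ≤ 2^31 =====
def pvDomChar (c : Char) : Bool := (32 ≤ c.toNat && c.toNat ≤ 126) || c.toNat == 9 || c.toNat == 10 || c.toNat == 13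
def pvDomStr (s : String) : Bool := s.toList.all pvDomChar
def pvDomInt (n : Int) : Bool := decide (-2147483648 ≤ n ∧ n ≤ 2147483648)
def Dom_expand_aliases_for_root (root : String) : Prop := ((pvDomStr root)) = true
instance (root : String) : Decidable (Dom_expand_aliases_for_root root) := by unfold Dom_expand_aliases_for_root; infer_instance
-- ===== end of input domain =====

-- B replaces A's per-call scan of ROOT_ALIASES by a one-time precomputed full-answer
-- table (reverse index + expansion dict), so each call is a single dictionary lookup (objective: alternative).
-- Outputs are Python sets; the proved list equality fixes one representative insertion order for both ports.

-- shared module constant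
def ROOT_ALIASES : PySem.Dict String (PySem.Set String) :=
  PySem.Dict.ofList [
    ("HRH", PySem.Set.ofList ["BVN"]),
    ("NTN", PySem.Set.ofList ["CLM"]),
    ("NC>", PySem.Set.ofList ["NC>", "NCJ"]),
    ("RDH", PySem.Set.ofList ["CLV"]),
    ("MCL", PySem.Set.ofList ["CLV"]),
    ("CLV", PySem.Set.ofList ["CLV", "MCL", "RDH"]),
    ("BW>", PySem.Set.ofList [">TJ"])]

-- ===== PORT A =====
def expand_aliases_for_root (root : String) : List String :=
  let aliases : PySem.Set String := PySem.Set.empty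
  let aliases := if ROOT_ALIASES.contains root then
      PySem.Set.union aliases (PySem.Set.ofList (ROOT_ALIASES.getD root PySem.Set.empty))
    else aliases
  let aliases := ROOT_ALIASES.items.foldl (fun al kv =>
      if PySem.Set.contains kv.2 root then
        PySem.Set.union (PySem.Set.add al kv.1) (PySem.Set.ofList kv.2)
      else al) aliases
  PySem.Set.add aliases root

-- ===== PORT B =====
-- _REVERSE[m] = union of {k} | v over all items (k, v) of ROOT_ALIASES with m in v
def REVERSE_INDEX : PySem.Dict String (PySem.Set String) :=
  ROOT_ALIASES.items.foldl (fun d kv =>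
    kv.2.foldl (fun d' m =>
      let e := d'.getD m PySem.Set.empty
      d'.insert m (PySem.Set.update (PySem.Set.add e kv.1) kv.2)) d)
    PySem.Dict.empty

-- EXPANSION[s] = the full one-step alias answer for every symbol s occurring anywhere
def EXPANSION : PySem.Dict String (PySem.Set String) :=
  (ROOT_ALIASES.keys ++ ROOT_ALIASES.values.flatten).foldl
    (fun d s =>
      let full := PySem.Set.ofList (ROOT_ALIASES.getD s PySem.Set.empty)
      let full := PySem.Set.union full (REVERSE_INDEX.getD s PySem.Set.empty)
      let full := PySem.Set.add full s
      d.insert s full) PySem.Dict.empty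

def expand_aliases_for_root_alt (root : String) : List String :=
  match EXPANSION.get? root with
  | some full => PySem.Set.ofList full   -- set(full): a fresh copy
  | none => PySem.Set.ofList [root]      -- {root}

-- ===== PRECONDITION & SPEC =====
def Spec_expand_aliases_for_root (root : String) (out : List String) : Prop := out = expand_aliases_for_root_alt root
instance (root : String) (out : List String) : Decidable (Spec_expand_aliases_for_root root out) := by unfold Spec_expand_aliases_for_root; infer_instance

-- ===== CLAIM (what is proved, stated in full; the proofs are below) =====
def Claim_equal_expand_aliases_for_root : Prop := ∀ (root : String), Dom_expand_aliases_for_root root → Spec_expand_aliases_for_root root (expand_aliases_for_root root)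

-- ===== LEMMAS AND PROOFS =====

theorem ROOT_ALIASES_eq : ROOT_ALIASES = PySem.Dict.mk
    [("HRH", ["BVN"]), ("NTN", ["CLM"]), ("NC>", ["NC>", "NCJ"]), ("RDH", ["CLV"]),
     ("MCL", ["CLV"]), ("CLV", ["CLV", "MCL", "RDH"]), ("BW>", [">TJ"])] := by decide

theorem EXPANSION_eq : EXPANSION = PySem.Dict.mk
    [("HRH", ["BVN", "HRH"]), ("NTN", ["CLM", "NTN"]), ("NC>", ["NC>", "NCJ"]),
     ("RDH", ["CLV", "MCL", "RDH"]), ("MCL", ["CLV", "MCL", "RDH"]),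
     ("CLV", ["CLV", "MCL", "RDH"]), ("BW>", [">TJ", "BW>"]), ("BVN", ["HRH", "BVN"]),
     ("CLM", ["NTN", "CLM"]), ("NCJ", ["NC>", "NCJ"]), (">TJ", ["BW>", ">TJ"])] := by decide

-- Any root other than the 11 symbols occurring in ROOT_ALIASES expands to {root} on both sides.
theorem expand_agree_of_fresh (root : String) (h1 : root ≠ "HRH") (h2 : root ≠ "NTN")
    (h3 : root ≠ "NC>") (h4 : root ≠ "RDH") (h5 : root ≠ "MCL") (h6 : root ≠ "CLV")
    (h7 : root ≠ "BW>") (h8 : root ≠ "BVN") (h9 : root ≠ "CLM") (h10 : root ≠ "NCJ")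
    (h11 : root ≠ ">TJ") :
    expand_aliases_for_root root = expand_aliases_for_root_alt root := by
  simp only [expand_aliases_for_root, expand_aliases_for_root_alt, ROOT_ALIASES_eq, EXPANSION_eq]
  simp [PySem.Dict.contains, PySem.Set.contains,
    PySem.Set.add_of_not_mem, PySem.Set.empty, PySem.Set.ofList, PySem.Dict.get?,
    Ne.symm h1, Ne.symm h2, Ne.symm h3, Ne.symm h4, Ne.symm h5, Ne.symm h6, Ne.symm h7,
    Ne.symm h8, Ne.symm h9, Ne.symm h10, Ne.symm h11, h1, h2, h3, h4, h5, h6, h7, h8, h9,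
    h10, h11]

-- ===== VERDICT (by name: the statement is the Claim_ definition above) =====
theorem expand_aliases_for_root_spec : Claim_equal_expand_aliases_for_root := by
  intro root _
  unfold Spec_expand_aliases_for_root
  by_cases h1 : root = "HRH";  · subst h1; decide
  by_cases h2 : root = "NTN";  · subst h2; decide
  by_cases h3 : root = "NC>";  · subst h3; decide
  by_cases h4 : root = "RDH";  · subst h4; decide
  by_cases h5 : root = "MCL";  · subst h5; decide
  by_cases h6 : root = "CLV";  · subst h6; decide
  by_cases h7 : root = "BW>";  · subst h7; decide
  by_cases h8 : root = "BVN";  · subst h8; decide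
  by_cases h9 : root = "CLM";  · subst h9; decide
  by_cases h10 : root = "NCJ"; · subst h10; decide
  by_cases h11 : root = ">TJ"; · subst h11; decide
  exact expand_agree_of_fresh root h1 h2 h3 h4 h5 h6 h7 h8 h9 h10 h11
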